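-- pv_equiv track=rewrite | github.com/SenuDyl/FYP-21-SoundEdge-ESC-Application | backend/utils/visualization.py | remove_nested_boxes
-- ===== SOURCE A (Python) =====
-- def remove_nested_boxes(boxes):
--     boxes = sorted(boxes, key=lambda b: b[2] * b[3], reverse=True)
--     kept = []
--     for box in boxes:
--         x, y, w, h = box
--         x2, y2 = x + w, y + h
--
--         inside = False
--         for kx, ky, kw, kh in kept:
--             kx2, ky2 = kx + kw, ky + kh
--             if x >= kx and y >= ky and x2 <= kx2 and y2 <= ky2:
--                 inside = True
--                 break
--
--         if not inside:
--             kept.append(box)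
--     return kept
-- ===== SOURCE B (Python) =====
-- def remove_nested_boxes(boxes):
--     s = sorted(boxes, key=lambda b: b[2] * b[3], reverse=True)
--
--     def contained(o, b):
--         return (b[0] >= o[0] and b[1] >= o[1]
--                 and b[0] + b[2] <= o[0] + o[2] and b[1] + b[3] <= o[1] + o[3])
--
--     return [b for i, b in enumerate(s)
--             if not any(contained(o, b) for o in s[:i])]
-- ===== Notes on version B (the rewrite author's own statement) =====
-- stated objective: simpler
-- what changed: Drops the greedy `kept` accumulator: after the same area-descending sort, a box is kept iff no earlier box in the sorted list contains it (containment is reflexive and transitive, so testing against all predecessors equals testing against kept ones).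
import Mathlib
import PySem

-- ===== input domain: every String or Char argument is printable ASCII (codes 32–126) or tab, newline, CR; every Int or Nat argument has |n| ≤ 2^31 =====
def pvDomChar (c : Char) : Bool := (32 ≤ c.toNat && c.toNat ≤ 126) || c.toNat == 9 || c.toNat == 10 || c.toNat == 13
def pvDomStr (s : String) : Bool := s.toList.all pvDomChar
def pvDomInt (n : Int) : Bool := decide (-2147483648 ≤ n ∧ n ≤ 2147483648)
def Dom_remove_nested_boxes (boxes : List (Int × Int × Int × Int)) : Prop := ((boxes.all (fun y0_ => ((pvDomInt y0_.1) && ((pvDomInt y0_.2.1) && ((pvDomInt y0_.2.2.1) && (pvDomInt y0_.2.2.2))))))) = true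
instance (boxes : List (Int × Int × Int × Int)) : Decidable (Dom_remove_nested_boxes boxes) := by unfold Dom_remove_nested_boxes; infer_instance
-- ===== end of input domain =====

-- B replaces A's greedy `kept` accumulator by an index-based filter ("keep iff no earlier
-- sorted box contains it") — same return value, a simpler decomposition (objective: simpler).

-- `pvContains o b` = the Python condition "b lies inside o" (shared by both sources)
def pvContains (o b : Int × Int × Int × Int) : Bool :=
  decide (b.1 ≥ o.1) && decide (b.2.1 ≥ o.2.1) &&
  decide (b.1 + b.2.2.1 ≤ o.1 + o.2.2.1) && decide (b.2.1 + b.2.2.2 ≤ o.2.1 + o.2.2.2)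

-- ===== PORT A =====
-- inner `for kx, ky, kw, kh in kept: … break` loop: returns `inside`
def pvInnerA (box : Int × Int × Int × Int) : List (Int × Int × Int × Int) → Bool
  | [] => false
  | k :: rest => if pvContains k box then true else pvInnerA box rest

-- outer `for box in boxes` loop with the `kept` accumulator
def pvLoopA (kept : List (Int × Int × Int × Int)) :
    List (Int × Int × Int × Int) → List (Int × Int × Int × Int)
  | [] => kept
  | box :: rest =>
      let inside := pvInnerA box kept
      if inside then pvLoopA kept rest else pvLoopA (kept ++ [box]) rest

def remove_nested_boxes (boxes : List (Int × Int × Int × Int)) : List (Int × Int × Int × Int) :=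
  pvLoopA [] (PySem.List.sorted boxes (fun b => b.2.2.1 * b.2.2.2) true)

-- ===== PORT B =====
def remove_nested_boxes_alt (boxes : List (Int × Int × Int × Int)) : List (Int × Int × Int × Int) :=
  let s := PySem.List.sorted boxes (fun b => b.2.2.1 * b.2.2.2) true
  ((PySem.List.enumerate s 0).filter
      (fun p => !((PySem.List.slice s none (some p.1)).any (fun o => pvContains o p.2)))).map (·.2)

-- ===== PRECONDITION & SPEC =====
def Spec_remove_nested_boxes (boxes : List (Int × Int × Int × Int)) (out : List (Int × Int × Int × Int)) : Prop := out = remove_nested_boxes_alt boxes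
instance (boxes : List (Int × Int × Int × Int)) (out : List (Int × Int × Int × Int)) : Decidable (Spec_remove_nested_boxes boxes out) := by unfold Spec_remove_nested_boxes; infer_instance

-- ===== CLAIM (what is proved, stated in full; the proofs are below) =====
def Claim_equal_remove_nested_boxes : Prop := ∀ (boxes : List (Int × Int × Int × Int)), Dom_remove_nested_boxes boxes → Spec_remove_nested_boxes boxes (remove_nested_boxes boxes)

-- ===== LEMMAS AND PROOFS =====

theorem pvContains_refl (b : Int × Int × Int × Int) : pvContains b b = true := by
  simp [pvContains]

theorem pvContains_trans {a b c : Int × Int × Int × Int}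
    (h1 : pvContains a b = true) (h2 : pvContains b c = true) : pvContains a c = true := by
  simp only [pvContains, Bool.and_eq_true, decide_eq_true_eq] at *
  omega

-- proof-side reference form of B's filter: recursion on the suffix, carrying the prefix
def pvAltGo (pre : List (Int × Int × Int × Int)) :
    List (Int × Int × Int × Int) → List (Int × Int × Int × Int)
  | [] => []
  | b :: rest =>
      if pre.any (fun o => pvContains o b) then pvAltGo (pre ++ [b]) rest
      else b :: pvAltGo (pre ++ [b]) rest

theorem pvInnerA_eq_any (box : Int × Int × Int × Int) (kept : List (Int × Int × Int × Int)) :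
    pvInnerA box kept = kept.any (fun k => pvContains k box) := by
  induction kept with
  | nil => rfl
  | cons k rest ih =>
      simp only [pvInnerA, List.any_cons, ih]
      by_cases h : pvContains k box = true <;> simp [h]

theorem pvAlt_bridge (s : List (Int × Int × Int × Int)) :
    ∀ (rest pre : List (Int × Int × Int × Int)), s = pre ++ rest →
    ((PySem.List.enumerate rest (pre.length : Int)).filter
        (fun p => !((PySem.List.slice s none (some p.1)).any (fun o => pvContains o p.2)))).map (·.2)
      = pvAltGo pre rest := by
  intro rest
  induction rest with
  | nil => intro pre _; simp [PySem.List.enumerate, pvAltGo]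
  | cons b rest ih =>
      intro pre hs
      have hslice : PySem.List.slice s none (some ((pre.length : Nat) : Int)) = pre := by
        rw [PySem.List.slice_to_natCast, hs]
        simp
      rw [PySem.List.enumerate_cons, List.filter_cons]
      have hlen : ((pre.length : Int) + 1) = (((pre ++ [b]).length : Nat) : Int) := by
        simp
      by_cases hc : pre.any (fun o => pvContains o b) = true
      · rw [if_neg (by simp [hslice, hc])]
        rw [hlen, ih (pre ++ [b]) (by simp [hs])]
        simp only [pvAltGo, hc, if_pos]
      · rw [Bool.not_eq_true] at hc
        rw [if_pos (by simp [hslice, hc])]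
        simp only [List.map_cons]
        rw [hlen, ih (pre ++ [b]) (by simp [hs])]
        simp [pvAltGo, hc]

theorem pvLoop_eq : ∀ (rest kept pre : List (Int × Int × Int × Int)),
    (∀ k ∈ kept, k ∈ pre) →
    (∀ o ∈ pre, ∃ k ∈ kept, pvContains k o = true) →
    pvLoopA kept rest = kept ++ pvAltGo pre rest := by
  intro rest
  induction rest with
  | nil => intro kept pre _ _; simp [pvLoopA, pvAltGo]
  | cons b rest ih =>
      intro kept pre hsub hcov
      have hEq : kept.any (fun k => pvContains k b) = pre.any (fun o => pvContains o b) := by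
        by_cases h : kept.any (fun k => pvContains k b) = true
        · rw [h]; symm
          rw [List.any_eq_true] at h ⊢
          obtain ⟨k, hk, hkc⟩ := h
          exact ⟨k, hsub k hk, hkc⟩
        · rw [Bool.not_eq_true] at h; rw [h]; symm
          rw [Bool.eq_false_iff]; intro hp
          rw [List.any_eq_true] at hp
          obtain ⟨o, ho, hoc⟩ := hp
          obtain ⟨k, hk, hkc⟩ := hcov o ho
          have : kept.any (fun k => pvContains k b) = true :=
            List.any_eq_true.mpr ⟨k, hk, pvContains_trans hkc hoc⟩
          simp [this] at h
      simp only [pvLoopA, pvInnerA_eq_any, hEq]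
      by_cases hc : pre.any (fun o => pvContains o b) = true
      · rw [if_pos hc]
        rw [ih kept (pre ++ [b]) (fun k hk => by simp [hsub k hk])
              (fun o ho => by
                rcases List.mem_append.mp ho with h' | h'
                · exact hcov o h'
                · rw [List.mem_singleton] at h'; rw [h']
                  rw [List.any_eq_true] at hc
                  obtain ⟨o', ho', hoc⟩ := hc
                  obtain ⟨k, hk, hkc⟩ := hcov o' ho'
                  exact ⟨k, hk, pvContains_trans hkc hoc⟩)]
        simp [pvAltGo, hc]
      · rw [Bool.not_eq_true] at hc
        rw [hc, if_neg (by simp)]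
        rw [ih (kept ++ [b]) (pre ++ [b])
              (fun k hk => by
                rcases List.mem_append.mp hk with h' | h'
                · simp [hsub k h']
                · simp [h'])
              (fun o ho => by
                rcases List.mem_append.mp ho with h' | h'
                · obtain ⟨k, hk, hkc⟩ := hcov o h'
                  exact ⟨k, by simp [hk], hkc⟩
                · rw [List.mem_singleton] at h'; rw [h']
                  exact ⟨b, by simp, pvContains_refl b⟩)]
        simp [pvAltGo, hc]

-- ===== VERDICT (by name: the statement is the Claim_ definition above) =====
theorem remove_nested_boxes_spec : Claim_equal_remove_nested_boxes := by
  intro boxes _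
  unfold Spec_remove_nested_boxes remove_nested_boxes remove_nested_boxes_alt
  have hb := pvAlt_bridge (PySem.List.sorted boxes (fun b => b.2.2.1 * b.2.2.2) true)
      (PySem.List.sorted boxes (fun b => b.2.2.1 * b.2.2.2) true) [] (by simp)
  simp only [List.length_nil, Nat.cast_zero] at hb
  rw [pvLoop_eq _ [] [] (by simp) (by simp), List.nil_append, ← hb]
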